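-- pv_equiv track=rewrite | github.com/Excellcode/6.1010 | 6.1010_new/recipes/recipes/lab.py | combine_recipes
-- ===== SOURCE A (Python) =====
-- def add_recipes(recipe_dicts):
--     """
--     Given a list of recipe dictionaries that map atomic food items to quantities,
--     return a new dictionary that maps each ingredient name
--     to the sum of its quantities across the given recipe dictionaries.
--
--     Example:
--         add_recipes([{'milk':1, 'chocolate':1}, {'sugar':1, 'milk':2}])
--         - {'milk':3, 'chocolate':1, 'sugar':1}
--     """
--     result = {}
--     # Merge all ingredient counts across dictionaries
--     for recipe_dict in recipe_dicts:
--         for recipe, recipe_num in recipe_dict.items():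
--             # Initialize missing entries with 0
--             if recipe not in result:
--                 result[recipe] = 0
--             result[recipe] += recipe_num
--     return result
--
-- def combine_recipes(nested_recipes):
--     """
--     Given a list of lists of recipe dictionaries, where each inner list
--     represents all the recipes for a certain ingredient, compute and return a
--     list of recipe dictionaries that represent all the possible combinations of
--     ingredient recipes.
--
--     Essentially computes the Cartesian product of recipe options.
--     """
--     result = [[]]
--     for flat_recipe in nested_recipes:
--         # Combine current ingredient recipes with accumulated combinations
--         new_result = [
--             recipe_list[:] + [recipe]
--             for recipe_list in result
--             for recipe in flat_recipe
--         ]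
--         result = new_result
--
--     # Merge all ingredient quantities for each full combination
--     return [add_recipes(recipes_list) for recipes_list in result]
-- ===== SOURCE B (Python) =====
-- def combine_recipes(nested_recipes):
--     """Recursive Cartesian product threading a merged-quantity dict accumulator."""
--     def rec(index, acc):
--         if index == len(nested_recipes):
--             return [acc]
--         out = []
--         for recipe in nested_recipes[index]:
--             new = dict(acc)
--             for k, v in recipe.items():
--                 new[k] = new.get(k, 0) + v
--             out.extend(rec(index + 1, new))
--         return out
--     return rec(0, {})
-- ===== Notes on version B (the rewrite author's own statement) =====
-- stated objective: alternative
-- what changed: Replaces A's iterative product-of-lists (build every full list of recipe dicts, then merge each at the end with add_recipes) by a recursive Cartesian helper that threads one merged-quantity dict as an accumulator, merging each recipe as it is chosen; no intermediate lists of recipe lists exist.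
import Mathlib
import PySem

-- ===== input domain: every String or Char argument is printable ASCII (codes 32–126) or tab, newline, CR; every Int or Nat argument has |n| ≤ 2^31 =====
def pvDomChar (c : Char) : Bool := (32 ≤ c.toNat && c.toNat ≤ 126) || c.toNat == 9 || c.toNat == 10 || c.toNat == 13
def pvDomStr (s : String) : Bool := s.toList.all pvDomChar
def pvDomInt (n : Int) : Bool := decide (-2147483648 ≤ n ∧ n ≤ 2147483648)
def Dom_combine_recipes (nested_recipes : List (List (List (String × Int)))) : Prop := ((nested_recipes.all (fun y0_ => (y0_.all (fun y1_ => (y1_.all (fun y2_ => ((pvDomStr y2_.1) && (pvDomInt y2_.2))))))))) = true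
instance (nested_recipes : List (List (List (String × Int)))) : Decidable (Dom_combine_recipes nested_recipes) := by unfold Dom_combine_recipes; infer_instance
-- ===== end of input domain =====

-- B merges quantities incrementally during a recursive Cartesian traversal instead of
-- building all recipe-list combinations first and merging each at the end (objective: alternative).

-- ===== PORT A =====
-- add_recipes: merge a list of recipe dicts into one quantity dict
def pvAddRecipes (recipe_dicts : List (List (String × Int))) : PySem.Dict String Int :=
  recipe_dicts.foldl (fun result recipe_dict =>
    recipe_dict.foldl (fun result kv =>
      let result := if result.contains kv.1 then result else result.insert kv.1 0
      result.modify kv.1 0 (· + kv.2)) result) PySem.Dict.empty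

def combine_recipes (nested_recipes : List (List (List (String × Int)))) : List (List (String × Int)) :=
  let result := nested_recipes.foldl (fun result flat_recipe =>
    result.flatMap (fun recipe_list => flat_recipe.map (fun recipe => recipe_list ++ [recipe]))) [[]]
  result.map (fun recipes_list => (pvAddRecipes recipes_list).items)

-- ===== PORT B =====
-- new = dict(acc); for k, v in recipe.items(): new[k] = new.get(k, 0) + v
def pvMergeOne (acc : PySem.Dict String Int) (recipe : List (String × Int)) : PySem.Dict String Int :=
  recipe.foldl (fun new kv => new.insert kv.1 (new.getD kv.1 0 + kv.2)) acc

-- rec(index, acc): structural recursion over the remaining suffix of nested_recipes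
def pvRec : List (List (List (String × Int))) → PySem.Dict String Int → List (PySem.Dict String Int)
  | [], acc => [acc]
  | flat :: rest, acc =>
      flat.foldl (fun out recipe => out ++ pvRec rest (pvMergeOne acc recipe)) []

def combine_recipes_alt (nested_recipes : List (List (List (String × Int)))) : List (List (String × Int)) :=
  (pvRec nested_recipes PySem.Dict.empty).map PySem.Dict.items

-- ===== PRECONDITION & SPEC =====
def Spec_combine_recipes (nested_recipes : List (List (List (String × Int)))) (out : List (List (String × Int))) : Prop := out = combine_recipes_alt nested_recipes
instance (nested_recipes : List (List (List (String × Int)))) (out : List (List (String × Int))) : Decidable (Spec_combine_recipes nested_recipes out) := by unfold Spec_combine_recipes; infer_instance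

-- ===== CLAIM (what is proved, stated in full; the proofs are below) =====
def Claim_equal_combine_recipes : Prop := ∀ (nested_recipes : List (List (List (String × Int)))), Dom_combine_recipes nested_recipes → Spec_combine_recipes nested_recipes (combine_recipes nested_recipes)

-- ===== LEMMAS AND PROOFS =====

-- A's per-key step (insert 0 if absent, then += v) is B's per-key step (insert getD + v)
theorem pv_step_eq (d : PySem.Dict String Int) (k : String) (v : Int) :
    (if d.contains k then d else d.insert k 0).modify k 0 (· + v)
      = d.insert k (d.getD k 0 + v) := by
  by_cases h : d.contains k
  · simp only [h, if_true]; rfl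
  · simp only [h, Bool.false_eq_true, if_false]
    show (d.insert k 0).insert k ((d.insert k 0).getD k 0 + v) = _
    rw [PySem.Dict.insert_insert_self, PySem.Dict.getD_insert_self]
    rw [PySem.Dict.getD_of_not_contains (h := by simpa using h)]

-- hence add_recipes is exactly the fold of B's merge step
theorem pv_addRecipes_eq_foldl (ds : List (List (String × Int))) :
    pvAddRecipes ds = ds.foldl pvMergeOne PySem.Dict.empty := by
  unfold pvAddRecipes pvMergeOne
  congr 1
  funext result recipe_dict
  congr 1
  funext res kv
  exact pv_step_eq res kv.1 kv.2

theorem pv_addRecipes_append (rl : List (List (String × Int))) (r : List (String × Int)) :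
    pvAddRecipes (rl ++ [r]) = pvMergeOne (pvAddRecipes rl) r := by
  simp [pv_addRecipes_eq_foldl, List.foldl_append]

-- main bridge: mapping add_recipes over A's accumulated combinations = flatMap of B's recursion
theorem pv_cart_map_eq (ns : List (List (List (String × Int)))) :
    ∀ (L : List (List (List (String × Int)))),
      (ns.foldl (fun result flat_recipe =>
          result.flatMap (fun recipe_list => flat_recipe.map (fun recipe => recipe_list ++ [recipe]))) L).map
        (fun rl => pvAddRecipes rl)
      = L.flatMap (fun rl => pvRec ns (pvAddRecipes rl)) := by
  induction ns with
  | nil =>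
      intro L
      simp only [List.foldl_nil, pvRec]
      induction L with
      | nil => rfl
      | cons a t iht => simp [iht]
  | cons flat rest ih =>
      intro L
      simp only [List.foldl_cons]
      rw [ih]
      simp only [pvRec, PySem.List.foldl_append_eq_flatMap, List.nil_append,
        List.flatMap_assoc, List.flatMap_map, pv_addRecipes_append]

-- ===== VERDICT (by name: the statement is the Claim_ definition above) =====
theorem combine_recipes_spec : Claim_equal_combine_recipes := by
  intro ns _
  show combine_recipes ns = combine_recipes_alt ns
  unfold combine_recipes combine_recipes_alt
  have h := pv_cart_map_eq ns [[]]
  simp only [List.flatMap_cons, List.flatMap_nil, List.append_nil] at h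
  calc _ = ((ns.foldl (fun result flat_recipe =>
            result.flatMap (fun recipe_list => flat_recipe.map (fun recipe => recipe_list ++ [recipe]))) [[]]).map
            (fun rl => pvAddRecipes rl)).map PySem.Dict.items := by rw [List.map_map]; rfl
    _ = _ := by rw [h]; rfl
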